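-- pv_equiv track=rewrite | github.com/mouredev/retos-programacion-2023 | Retos/Reto #9 - HETEROGRAMA, ISOGRAMA Y PANGRAMA [Fácil]/python/PabloGradolph.py | heterograma
-- ===== SOURCE A (Python) =====
-- def heterograma(text: str) -> str:
--     letras = []
--     text = text.lower()
--     for letter in text:
--         if letter != " ":
--             if letter in letras:
--                 return "No se trata de un heterograma."
--             else:
--                 letras.append(letter)
--     return "Estamos ante un heterograma."
-- ===== SOURCE B (Python) =====
-- def heterograma(text: str) -> str:
--     letters = [c for c in text.lower() if c != " "]
--     if len(set(letters)) != len(letters):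
--         return "No se trata de un heterograma."
--     return "Estamos ante un heterograma."
-- ===== Notes on version B (the rewrite author's own statement) =====
-- stated objective: simpler
-- what changed: Replaces the incremental scan with an early return and a growing seen-list by a collect-then-compare strategy: build the filtered letter list once and compare its distinct count (set) with its length.
import Mathlib
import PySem

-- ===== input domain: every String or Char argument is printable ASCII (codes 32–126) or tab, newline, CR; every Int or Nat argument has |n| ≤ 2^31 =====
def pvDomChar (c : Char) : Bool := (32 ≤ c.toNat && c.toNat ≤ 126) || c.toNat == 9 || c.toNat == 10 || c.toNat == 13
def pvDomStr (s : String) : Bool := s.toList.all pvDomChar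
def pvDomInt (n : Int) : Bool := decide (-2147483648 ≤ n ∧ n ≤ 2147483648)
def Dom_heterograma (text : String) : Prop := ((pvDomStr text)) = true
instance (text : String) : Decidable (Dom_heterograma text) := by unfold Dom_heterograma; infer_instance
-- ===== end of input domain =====

-- B replaces A's incremental scan-with-early-return by collect-then-compare (distinct count vs length); objective: simpler.

-- ===== PORT A =====
-- the 'for letter in text' loop with accumulator 'letras' and early return
def hetLoopA : List Char → List Char → String
  | [], _ => "Estamos ante un heterograma."
  | c :: cs, letras =>
    if c ≠ ' ' then
      if letras.contains c then "No se trata de un heterograma."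
      else hetLoopA cs (letras ++ [c])
    else hetLoopA cs letras

def heterograma (text : String) : String :=
  hetLoopA (PySem.Str.lower text).toList []

-- ===== PORT B =====
def heterograma_alt (text : String) : String :=
  let letters := (PySem.Str.lower text).toList.filter (fun c => c != ' ')
  if (PySem.Set.ofList letters).length ≠ letters.length then
    "No se trata de un heterograma."
  else "Estamos ante un heterograma."

-- ===== PRECONDITION & SPEC =====
def Spec_heterograma (text : String) (out : String) : Prop := out = heterograma_alt text
instance (text : String) (out : String) : Decidable (Spec_heterograma text out) := by unfold Spec_heterograma; infer_instance

-- ===== CLAIM (what is proved, stated in full; the proofs are below) =====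
def Claim_equal_heterograma : Prop := ∀ (text : String), Dom_heterograma text → Spec_heterograma text (heterograma text)

-- ===== LEMMAS AND PROOFS =====

theorem ofList_sublist {α : Type} [BEq α] [LawfulBEq α] (l : List α) :
    (PySem.Set.ofList l).Sublist l := by
  induction l with
  | nil => simp [PySem.Set.ofList]
  | cons x xs ih =>
    rw [PySem.Set.ofList_cons]
    exact List.Sublist.cons₂ x ((List.filter_sublist ..).trans ih)

theorem length_ofList_eq_iff {α : Type} [BEq α] [LawfulBEq α] (l : List α) :
    (PySem.Set.ofList l).length = l.length ↔ l.Nodup := by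
  constructor
  · intro h
    have he := (ofList_sublist l).eq_of_length h
    rw [← he]
    exact PySem.Set.nodup_ofList l
  · intro h
    rw [PySem.Set.ofList_eq_self_of_nodup l h]

theorem hetLoopA_char (xs acc : List Char) (hacc : acc.Nodup) :
    hetLoopA xs acc =
      if (acc ++ xs.filter (fun c => c != ' ')).Nodup then "Estamos ante un heterograma."
      else "No se trata de un heterograma." := by
  induction xs generalizing acc with
  | nil => simp [hetLoopA, hacc]
  | cons c cs ih =>
    by_cases hc : c = ' '
    · simp [hetLoopA, hc, ih acc hacc]
    · by_cases hm : c ∈ acc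
      · have hbad : ¬ (acc ++ c :: List.filter (fun c => c != ' ') cs).Nodup := by
          intro hnd
          rcases List.nodup_append.1 hnd with ⟨_, _, hdis⟩
          exact hdis c hm c (by simp) rfl
        simp [hetLoopA, hc, hm, hbad]
      · have hacc' : (acc ++ [c]).Nodup := by
          simp only [List.nodup_append, List.nodup_cons]
          refine ⟨hacc, ⟨by simp, by simp⟩, ?_⟩
          intro a ha b hb
          simp at hb; subst hb; exact fun he => hm (he ▸ ha)
        simp only [hetLoopA, if_pos hc]
        rw [if_neg (by simpa using hm), ih (acc ++ [c]) hacc']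
        simp [hc, List.append_assoc]

-- ===== VERDICT (by name: the statement is the Claim_ definition above) =====
theorem heterograma_spec : Claim_equal_heterograma := by
  intro text _
  unfold Spec_heterograma heterograma heterograma_alt
  rw [hetLoopA_char _ _ List.nodup_nil]
  simp only [List.nil_append]
  by_cases h : ((PySem.Str.lower text).toList.filter (fun c => c != ' ')).Nodup
  · rw [if_pos h, if_neg (fun hn => hn ((length_ofList_eq_iff _).2 h))]
  · rw [if_neg h, if_pos (fun he => h ((length_ofList_eq_iff _).1 he))]
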